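-- pv_equiv track=rewrite | github.com/haolunc/ARC-RL | reference_solutions/solutions/80214e03.py | transform
-- ===== SOURCE A (Python) =====
-- def transform(grid):
--
--     H = len(grid)
--     W = len(grid[0])
--
--     row_info = []
--     for r in range(H):
--         s = {grid[r][c] for c in range(W) if grid[r][c] != 0}
--         if s:
--             row_info.append((r, frozenset(s)))
--
--     row_groups = []
--     i = 0
--     while i < len(row_info):
--         r_start, cur_set = row_info[i]
--         r_end = r_start
--         j = i + 1
--         while j < len(row_info) and row_info[j][1] == cur_set and              row_info[j][0] == r_end + 1:
--             r_end = row_info[j][0]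
--             j += 1
--         row_groups.append((r_start, r_end))
--         i = j
--
--     col_info = []
--     for c in range(W):
--         s = {grid[r][c] for r in range(H) if grid[r][c] != 0}
--         if s:
--             col_info.append((c, frozenset(s)))
--
--     col_groups = []
--     i = 0
--     while i < len(col_info):
--         c_start, cur_set = col_info[i]
--         c_end = c_start
--         j = i + 1
--         while j < len(col_info) and col_info[j][1] == cur_set and              col_info[j][0] == c_end + 1:
--             c_end = col_info[j][0]
--             j += 1
--         col_groups.append((c_start, c_end))
--         i = j
--
--     result = []
--     for r0, r1 in row_groups:
--         row_vals = []
--         for c0, c1 in col_groups: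
--             freq = {}
--             for r in range(r0, r1 + 1):
--                 for c in range(c0, c1 + 1):
--                     v = grid[r][c]
--                     if v != 0:
--                         freq[v] = freq.get(v, 0) + 1
--             if not freq:
--                 colour = 0
--             else:
--                 max_cnt = max(freq.values())
--
--                 colour = min(k for k, v in freq.items() if v == max_cnt)
--             row_vals.append(colour)
--
--         row_vals.reverse()
--         result.append(row_vals)
--
--     return result
-- ===== SOURCE B (Python) =====
-- def transform(grid):
--     H, W = len(grid), len(grid[0])
--     rsig = [frozenset(v for v in row[:W] if v) for row in grid]
--     csig = [frozenset(grid[r][c] for r in range(H) if grid[r][c]) for c in range(W)]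
--
--     def bounds(sig):
--         # run boundaries by comparing each line's colour set with its neighbours:
--         # a run starts where the set is nonempty and differs from the previous one,
--         # ends where it differs from the next one; zip the two boundary lists.
--         starts = [i for i, (p, s) in enumerate(zip([frozenset()] + sig, sig)) if s and p != s]
--         ends = [i for i, (s, n) in enumerate(zip(sig, sig[1:] + [frozenset()])) if s and s != n]
--         return list(zip(starts, ends))
--
--     def mode(vals):
--         # smallest colour with the maximal count: scan runs of the sorted values
--         best, colour, run, prev = 0, 0, 0, None
--         for v in sorted(vals):
--             run = run + 1 if v == prev else 1
--             prev = v
--             if run > best: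
--                 best, colour = run, v
--         return colour
--
--     return [[mode(v for r in range(r0, r1 + 1) for v in grid[r][c0:c1 + 1] if v)
--              for c0, c1 in bounds(csig)[::-1]]
--             for r0, r1 in bounds(rsig)]
-- ===== Notes on version B (the rewrite author's own statement) =====
-- stated objective: alternative
-- what changed: Grouping: instead of A's two-stage build-signature-list-then-merge-runs with nested while loops, B detects run boundaries locally by comparing each row/column colour set with its neighbours (zip with the shifted list), producing the start list and end list independently and zipping them; block colour: instead of A's frequency dict + max of values + min over argmax keys, B sorts the block's nonzero values and scans maximal runs, keeping the first (hence smallest) value whose run length strictly exceeds the best so far.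
import Mathlib
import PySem

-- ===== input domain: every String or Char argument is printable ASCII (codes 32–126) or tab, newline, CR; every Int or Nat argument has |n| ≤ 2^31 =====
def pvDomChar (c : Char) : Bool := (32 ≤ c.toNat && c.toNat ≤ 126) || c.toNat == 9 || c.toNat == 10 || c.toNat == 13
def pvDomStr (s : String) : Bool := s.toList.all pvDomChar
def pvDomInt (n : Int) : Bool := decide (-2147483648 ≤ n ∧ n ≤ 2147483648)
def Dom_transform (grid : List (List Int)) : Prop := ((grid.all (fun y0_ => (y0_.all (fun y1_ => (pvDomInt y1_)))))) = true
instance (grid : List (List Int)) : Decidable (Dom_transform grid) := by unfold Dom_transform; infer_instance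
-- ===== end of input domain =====

-- B replaces A's two-stage run merging (signature list + nested while loops) by local
-- neighbour-comparison boundary lists zipped into groups, and A's per-block frequency dict
-- by a run scan over the sorted block values; equal return value proved on Pre_.

-- ===== PORT A =====

-- row_info loop: for r in range(H): s = {grid[r][c] … if ≠ 0}; if s: append (r, frozenset(s))
def pvRowInfoA (grid : List (List Int)) (H W : Int) : List (Int × PySem.Set Int) :=
  (PySem.List.pyRange 0 H 1).foldl (fun info r =>
    let s : PySem.Set Int := PySem.Set.ofList
      (((PySem.List.pyRange 0 W 1).map (fun c =>
          PySem.List.pyGetD (PySem.List.pyGetD grid r []) c 0)).filter (fun v => !(v == 0)))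
    if s.isEmpty then info else info ++ [(r, s)]) []

-- col_info loop
def pvColInfoA (grid : List (List Int)) (H W : Int) : List (Int × PySem.Set Int) :=
  (PySem.List.pyRange 0 W 1).foldl (fun info c =>
    let s : PySem.Set Int := PySem.Set.ofList
      (((PySem.List.pyRange 0 H 1).map (fun r =>
          PySem.List.pyGetD (PySem.List.pyGetD grid r []) c 0)).filter (fun v => !(v == 0)))
    if s.isEmpty then info else info ++ [(c, s)]) []

-- inner while: advance j while same set and consecutive index
def pvExtendA (e : Int) (cur : PySem.Set Int) :
    List (Int × PySem.Set Int) → Int × List (Int × PySem.Set Int)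
  | [] => (e, [])
  | (r, s) :: rest =>
      if PySem.Set.equal s cur && (r == e + 1) then pvExtendA r cur rest
      else (e, (r, s) :: rest)

theorem pvExtendA_len (cur : PySem.Set Int) :
    ∀ (l : List (Int × PySem.Set Int)) (e : Int), ((pvExtendA e cur l).2).length ≤ l.length := by
  intro l
  induction l with
  | nil => intro e; simp [pvExtendA]
  | cons p rest ih =>
      intro e
      simp only [pvExtendA]
      split
      · exact le_trans (ih p.1) (by simp)
      · simp

-- outer while over row_info / col_info
def pvGroupsA : List (Int × PySem.Set Int) → List (Int × Int)
  | [] => []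
  | (r, s) :: rest =>
      let p := pvExtendA r s rest
      (r, p.1) :: pvGroupsA p.2
  termination_by l => l.length
  decreasing_by
    have := pvExtendA_len s rest r
    simpa using Nat.lt_succ_of_le this

-- freq dict + max of values + min of argmax keys
def pvBlockColourA (grid : List (List Int)) (r0 r1 c0 c1 : Int) : Int :=
  let freq : PySem.Dict Int Int :=
    (PySem.List.pyRange r0 (r1 + 1) 1).foldl (fun d r =>
      (PySem.List.pyRange c0 (c1 + 1) 1).foldl (fun d c =>
        let v := PySem.List.pyGetD (PySem.List.pyGetD grid r []) c 0
        if !(v == 0) then d.insert v (d.getD v 0 + 1) else d) d) PySem.Dict.empty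
  if freq.items.isEmpty then 0
  else
    let maxCnt := (PySem.List.max? freq.values (fun y => y)).getD 0
    (PySem.List.min? (((freq.items.filter (fun kv => kv.2 == maxCnt))).map (·.1)) (fun k => k)).getD 0

def transform (grid : List (List Int)) : List (List Int) :=
  let H : Int := grid.length
  let W : Int := (PySem.List.pyGetD grid 0 []).length
  let rowGroups := pvGroupsA (pvRowInfoA grid H W)
  let colGroups := pvGroupsA (pvColInfoA grid H W)
  rowGroups.foldl (fun res g =>
    let rowVals := colGroups.foldl (fun rv h =>
      rv ++ [pvBlockColourA grid g.1 g.2 h.1 h.2]) []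
    res ++ [rowVals.reverse]) []

-- ===== PORT B =====

-- frozenset(v for v in cells if v)
def pvSig (cells : List Int) : PySem.Set Int :=
  PySem.Set.ofList (cells.filter (fun v => !(v == 0)))

-- bounds(sig): starts where a nonempty set differs from its predecessor, ends where it
-- differs from its successor (zip against the shifted list), zipped into (start, end) pairs
def pvBounds (sig : List (PySem.Set Int)) : List (Int × Int) :=
  (((PySem.List.enumerate ((PySem.Set.empty :: sig).zip sig)).filter
      (fun q => !q.2.2.isEmpty && !(PySem.Set.equal q.2.1 q.2.2))).map (·.1)).zip
    (((PySem.List.enumerate (sig.zip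
          (PySem.List.slice sig (some 1) none ++ [PySem.Set.empty]))).filter
        (fun q => !q.2.1.isEmpty && !(PySem.Set.equal q.2.1 q.2.2))).map (·.1))

-- mode(vals): run scan over the sorted values; state = (best, colour, run, prev)
def pvMode (vals : List Int) : Int :=
  let st := (PySem.List.sorted vals (fun v => v) false).foldl
    (fun (st : Int × Int × Int × Option Int) v =>
      let run := if st.2.2.2 == some v then st.2.2.1 + 1 else 1
      if run > st.1 then (run, v, run, some v) else (st.1, st.2.1, run, some v))
    (0, 0, 0, none)
  st.2.1

def transform_alt (grid : List (List Int)) : List (List Int) :=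
  let H : Int := grid.length
  let W : Int := (PySem.List.pyGetD grid 0 []).length
  let rsig := grid.map (fun row => pvSig (PySem.List.slice row none (some W)))
  let csig := (PySem.List.pyRange 0 W 1).map (fun c =>
      pvSig ((PySem.List.pyRange 0 H 1).map (fun r =>
        PySem.List.pyGetD (PySem.List.pyGetD grid r []) c 0)))
  (pvBounds rsig).map (fun g =>
    -- bounds(csig)[::-1] is the reversed list
    ((pvBounds csig).reverse).map (fun h =>
      pvMode (((PySem.List.pyRange g.1 (g.2 + 1) 1).flatMap (fun r =>
        PySem.List.slice (PySem.List.pyGetD grid r []) (some h.1) (some (h.2 + 1)))).filter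
          (fun v => !(v == 0)))))

-- ===== PRECONDITION & SPEC =====
-- A raises IndexError on the empty grid (grid[0]) and whenever some row is shorter than the
-- first row (grid[r][c] for c < W); Pre_ excludes exactly those inputs.
def Pre_transform (grid : List (List Int)) : Prop :=
  grid ≠ [] ∧ ∀ row ∈ grid, (grid.headI).length ≤ row.length
instance (grid : List (List Int)) : Decidable (Pre_transform grid) := by
  unfold Pre_transform; infer_instance

def pvWitness_transform : List (List Int) := [[1, 0], [0, 2]]

def Spec_transform (grid : List (List Int)) (out : List (List Int)) : Prop := out = transform_alt grid
instance (grid : List (List Int)) (out : List (List Int)) : Decidable (Spec_transform grid out) := by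
  unfold Spec_transform; infer_instance

-- ===== CLAIM (what is proved, stated in full; the proofs are below) =====
def Claim_equal_transform : Prop :=
  ∀ (grid : List (List Int)), Dom_transform grid → Pre_transform grid →
    Spec_transform grid (transform grid)

-- ===== LEMMAS AND PROOFS =====
-- ---- generic list lemmas ----
theorem pv_foldl_flatMap {α β γ : Type} (g : β → List γ) (f : α → γ → α) :
    ∀ (l : List β) (init : α),
      (l.flatMap g).foldl f init = l.foldl (fun acc x => (g x).foldl f acc) init := by
  intro l
  induction l with
  | nil => intro init; simp
  | cons x t ih => intro init; simp [List.flatMap_cons, List.foldl_append, ih]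

theorem pv_filter_flatMap {α β : Type} (g : α → List β) (p : β → Bool) :
    ∀ (l : List α), (l.flatMap g).filter p = l.flatMap (fun x => (g x).filter p) := by
  intro l
  induction l with
  | nil => rfl
  | cons x t ih => simp [List.flatMap_cons, List.filter_append, ih]

theorem pv_mapRange_getD {β : Type} (xs : List β) (d : β) (a b : Nat) (hb : b ≤ xs.length) :
    (PySem.List.pyRange (a : Int) (b : Int) 1).map (fun i => PySem.List.pyGetD xs i d)
      = (xs.drop a).take (b - a) := by
  rw [PySem.List.pyRange_one, List.map_map]
  apply List.ext_getElem
  · simp [Int.toNat_sub']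
    omega
  · intro i h1 h2
    have hib : a + i < b := by
      simp [Int.toNat_sub'] at h1 ⊢
      omega
    simp only [List.getElem_map, List.getElem_range, Function.comp_apply]
    have : ((a : Int) + (i : Int)) = ((a + i : Nat) : Int) := by push_cast; ring
    rw [this, PySem.List.pyGetD_natCast, List.getElem_take, List.getElem_drop]
    exact List.getD_eq_getElem _ _ (by omega)

theorem pv_foldl_append_ifnot {α β : Type} (p : α → Bool) (f : α → β) (l : List α) (acc : List β) :
    l.foldl (fun acc x => if p x then acc else acc ++ [f x]) acc
      = acc ++ (l.filter (fun x => !(p x))).map f := by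
  have hfun : (fun (acc : List β) x => if p x then acc else acc ++ [f x])
      = (fun acc x => if (!(p x)) = true then acc ++ [f x] else acc) := by
    funext acc x
    cases h : p x <;> simp [h]
  rw [hfun, PySem.List.foldl_append_if]

-- ---- facts about PySem.Set.equal ----
theorem pvEq_symm {s t : PySem.Set Int} (h : PySem.Set.equal s t = true) :
    PySem.Set.equal t s = true := by
  rw [PySem.Set.equal_iff] at h ⊢
  intro x
  exact (h x).symm

theorem pvEq_empty (s u : PySem.Set Int) (hs : s.isEmpty = true) (hu : u.isEmpty = false) :
    PySem.Set.equal s u = false := by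
  rw [List.isEmpty_iff] at hs
  have hu' : u ≠ [] := by intro h; rw [h] at hu; simp at hu
  obtain ⟨x, hx⟩ := List.exists_mem_of_ne_nil u hu'
  by_contra h
  rw [Bool.not_eq_false, PySem.Set.equal_iff] at h
  have := (h x).mpr hx
  rw [hs] at this
  exact absurd this (List.not_mem_nil)

theorem pvExtendA_congr {p s : PySem.Set Int} (hps : PySem.Set.equal p s = true) :
    ∀ (l : List (Int × PySem.Set Int)) (e : Int), pvExtendA e p l = pvExtendA e s l := by
  intro l
  induction l with
  | nil => intro e; rfl
  | cons q rest ih =>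
      intro e
      obtain ⟨r, s'⟩ := q
      have hps' := (PySem.Set.equal_iff _ _).mp hps
      have hcond : PySem.Set.equal s' p = PySem.Set.equal s' s := by
        cases h1 : PySem.Set.equal s' p with
        | true =>
            symm
            rw [PySem.Set.equal_iff] at h1 ⊢
            intro x
            exact (h1 x).trans (hps' x)
        | false =>
            symm
            rw [Bool.eq_false_iff]
            intro h2
            rw [PySem.Set.equal_iff] at h2
            have : PySem.Set.equal s' p = true := by
              rw [PySem.Set.equal_iff]
              intro x
              exact (h2 x).trans (hps' x).symm
            rw [h1] at this
            exact absurd this (by simp)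
      simp only [pvExtendA, hcond]
      split
      · exact ih r
      · rfl

-- ---- the two boundary lists, structurally ----
def pvStL (p : PySem.Set Int) (k : Int) : List (PySem.Set Int) → List Int
  | [] => []
  | s :: t => (if !s.isEmpty && !(PySem.Set.equal p s) then [k] else []) ++ pvStL s (k + 1) t

def pvEnL (k : Int) : List (PySem.Set Int) → List Int
  | [] => []
  | s :: t =>
      (if !s.isEmpty && !(PySem.Set.equal s (t.headD PySem.Set.empty)) then [k] else [])
        ++ pvEnL (k + 1) t

theorem pvStarts_eq (sig : List (PySem.Set Int)) : ∀ (p : PySem.Set Int) (k : Int),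
    ((PySem.List.enumerate ((p :: sig).zip sig) k).filter
        (fun q => !q.2.2.isEmpty && !(PySem.Set.equal q.2.1 q.2.2))).map (·.1)
      = pvStL p k sig := by
  induction sig with
  | nil => intro p k; simp [pvStL]
  | cons s t ih =>
      intro p k
      rw [List.zip_cons_cons, PySem.List.enumerate_cons, List.filter_cons]
      cases hc : (!s.isEmpty && !(PySem.Set.equal p s)) with
      | true => simp [pvStL, hc, ih s (k + 1)]
      | false => simp [pvStL, hc, ih s (k + 1)]

theorem pvEnds_eq (sig : List (PySem.Set Int)) : ∀ (k : Int),
    ((PySem.List.enumerate (sig.zip (sig.tail ++ [PySem.Set.empty])) k).filter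
        (fun q => !q.2.1.isEmpty && !(PySem.Set.equal q.2.1 q.2.2))).map (·.1)
      = pvEnL k sig := by
  induction sig with
  | nil => intro k; simp [pvEnL]
  | cons s t ih =>
      intro k
      rw [pvEnL]
      cases t with
      | nil =>
          simp only [List.tail_cons, List.nil_append, List.zip_cons_cons, List.zip_nil_right,
            PySem.List.enumerate_cons, PySem.List.enumerate_nil, List.filter_cons,
            List.filter_nil, List.headD_nil]
          split
          · next h => simp [pvEnL, h]
          · next h => simp [pvEnL, h]
      | cons u t' =>
          have hrest := ih (k + 1)
          simp only [List.tail_cons] at hrest ⊢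
          simp only [List.cons_append, List.zip_cons_cons, PySem.List.enumerate_cons,
            List.filter_cons, List.headD_cons]
          rw [← hrest]
          split
          · next h => simp [h]
          · next h => simp [h]

-- ---- the info list A's grouping is about ----
def pvInfoS (k : Int) : List (PySem.Set Int) → List (Int × PySem.Set Int)
  | [] => []
  | s :: t => if s.isEmpty then pvInfoS (k + 1) t else (k, s) :: pvInfoS (k + 1) t

theorem pvInfoS_filter (sig : List (PySem.Set Int)) : ∀ (k : Int),
    pvInfoS k sig = (PySem.List.enumerate sig k).filter (fun q => !q.2.isEmpty) := by
  induction sig with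
  | nil => intro k; rfl
  | cons s t ih =>
      intro k
      rw [PySem.List.enumerate_cons, List.filter_cons]
      by_cases h : s.isEmpty = true
      · simp [pvInfoS, h, ih]
      · simp [pvInfoS, h, ih]

theorem pvInfoS_bounds (sig : List (PySem.Set Int)) :
    ∀ (k : Int), ∀ q ∈ pvInfoS k sig, k ≤ q.1 ∧ q.1 < k + sig.length := by
  induction sig with
  | nil => intro k q hq; simp [pvInfoS] at hq
  | cons s t ih =>
      intro k q hq
      simp only [pvInfoS] at hq
      by_cases h : s.isEmpty = true
      · rw [if_pos h] at hq
        have := ih (k + 1) q hq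
        simp only [List.length_cons]
        push_cast
        omega
      · rw [if_neg h] at hq
        rcases List.mem_cons.mp hq with hq | hq
        · rw [hq]
          simp only [List.length_cons]
          push_cast
          omega
        · have := ih (k + 1) q hq
          simp only [List.length_cons]
          push_cast
          omega

-- ---- streaming run-continuation flag ----
def pvContB (p : PySem.Set Int) : List (PySem.Set Int) → Bool
  | [] => false
  | s :: _ => !s.isEmpty && PySem.Set.equal p s

-- the zipped boundary lists compute exactly A's run-merging recursion
theorem pvZE (sig : List (PySem.Set Int)) :
    ∀ (k : Int) (p : PySem.Set Int),
      (pvContB p sig = false →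
        (pvStL p k sig).zip (pvEnL k sig) = pvGroupsA (pvInfoS k sig)) ∧
      (pvContB p sig = true →
        ∃ E, pvEnL k sig = (pvExtendA (k - 1) p (pvInfoS k sig)).1 :: E ∧
          (pvStL p k sig).zip E = pvGroupsA (pvExtendA (k - 1) p (pvInfoS k sig)).2) := by
  induction sig with
  | nil =>
      intro k p
      refine ⟨fun _ => by simp [pvStL, pvEnL, pvInfoS, pvGroupsA], fun h => by simp [pvContB] at h⟩
  | cons s t ih =>
      intro k p
      by_cases hs : s.isEmpty = true
      · -- all-zero line: separator; nothing emitted anywhere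
        have hst : pvStL p k (s :: t) = pvStL s (k + 1) t := by simp [pvStL, hs]
        have hen : pvEnL k (s :: t) = pvEnL (k + 1) t := by simp [pvEnL, hs]
        have hinfo : pvInfoS k (s :: t) = pvInfoS (k + 1) t := by simp [pvInfoS, hs]
        have hcont2 : pvContB s t = false := by
          cases t with
          | nil => rfl
          | cons u t' =>
              simp only [pvContB]
              by_cases hu : u.isEmpty = true
              · simp [hu]
              · simp [pvEq_empty s u hs (Bool.eq_false_iff.mpr hu)]
        constructor
        · intro _
          rw [hst, hen, hinfo]
          exact (ih (k + 1) s).1 hcont2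
        · intro hc
          simp [pvContB, hs] at hc
      · have hsne : s.isEmpty = false := Bool.eq_false_iff.mpr hs
        by_cases hct : pvContB s t = true
        · -- run continues into t
          obtain ⟨u, t', rfl⟩ : ∃ u t', t = u :: t' := by
            cases t with
            | nil => simp [pvContB] at hct
            | cons u t' => exact ⟨u, t', rfl⟩
          have hu : u.isEmpty = false := by
            simp only [pvContB, Bool.and_eq_true, Bool.not_eq_true'] at hct
            exact hct.1
          have hsu : PySem.Set.equal s u = true := by
            simp only [pvContB, Bool.and_eq_true] at hct
            exact hct.2
          have hen : pvEnL k (s :: u :: t') = pvEnL (k + 1) (u :: t') := by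
            simp [pvEnL, hsu]
          have hinfo : pvInfoS k (s :: u :: t') = (k, s) :: pvInfoS (k + 1) (u :: t') := by
            simp [pvInfoS, hsne]
          obtain ⟨E, hE1, hE2⟩ := (ih (k + 1) s).2 hct
          simp only [add_sub_cancel_right] at hE1 hE2
          constructor
          · intro hc
            have hps : PySem.Set.equal p s = false := by
              simp only [pvContB, hsne, Bool.not_false, Bool.true_and] at hc
              exact hc
            have hst : pvStL p k (s :: u :: t') = k :: pvStL s (k + 1) (u :: t') := by
              simp [pvStL, hsne, hps]
            rw [hst, hen, hE1, hinfo, List.zip_cons_cons, hE2]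
            simp only [pvGroupsA]
          · intro hc
            have hps : PySem.Set.equal p s = true := by
              simp only [pvContB, hsne, Bool.not_false, Bool.true_and] at hc
              exact hc
            have hst : pvStL p k (s :: u :: t') = pvStL s (k + 1) (u :: t') := by
              simp [pvStL, hps]
            have hstep : pvExtendA (k - 1) p (pvInfoS k (s :: u :: t'))
                = pvExtendA k s (pvInfoS (k + 1) (u :: t')) := by
              rw [hinfo]
              simp only [pvExtendA]
              have hcnd : (PySem.Set.equal s p && (k == k - 1 + 1)) = true := by
                rw [Bool.and_eq_true]
                refine ⟨pvEq_symm hps, ?_⟩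
                simp only [beq_iff_eq]
                omega
              rw [if_pos hcnd]
              exact pvExtendA_congr hps _ k
            refine ⟨E, ?_, ?_⟩
            · rw [hen, hE1, hstep]
            · rw [hst, hE2, hstep]
        · -- run does not continue into t
          have hct' : pvContB s t = false := Bool.eq_false_iff.mpr hct
          have hsnx : pvEnL k (s :: t) = k :: pvEnL (k + 1) t := by
            cases t with
            | nil =>
                have hsx : ∃ x, x ∈ s :=
                  List.exists_mem_of_ne_nil s (by simpa using hsne)
                simp [pvEnL, hsne, hsx]
            | cons u t' =>
                by_cases hu : u.isEmpty = true
                · have : PySem.Set.equal s u = false := by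
                    rw [Bool.eq_false_iff]
                    intro h
                    have := pvEq_symm h
                    rw [pvEq_empty u s hu hsne] at this
                    exact absurd this (by simp)
                  simp [pvEnL, hsne, this]
                · have hu' : u.isEmpty = false := Bool.eq_false_iff.mpr hu
                  have hsu : PySem.Set.equal s u = false := by
                    simp only [pvContB, hu', Bool.not_false, Bool.true_and] at hct'
                    exact hct'
                  simp [pvEnL, hsne, hsu]
          have hinfo : pvInfoS k (s :: t) = (k, s) :: pvInfoS (k + 1) t := by
            simp [pvInfoS, hsne]
          have hstop : pvExtendA k s (pvInfoS (k + 1) t) = (k, pvInfoS (k + 1) t) := by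
            cases t with
            | nil => rfl
            | cons u t' =>
                by_cases hu : u.isEmpty = true
                · have hrw : pvInfoS (k + 1) (u :: t') = pvInfoS (k + 1 + 1) t' := by
                    simp [pvInfoS, hu]
                  rw [hrw]
                  cases hI : pvInfoS (k + 1 + 1) t' with
                  | nil => rfl
                  | cons q rest =>
                      have hq : k + 1 + 1 ≤ q.1 :=
                        (pvInfoS_bounds t' (k + 1 + 1) q (by rw [hI]; exact List.mem_cons_self)).1
                      obtain ⟨r, s'⟩ := q
                      simp only [pvExtendA]
                      rw [if_neg]
                      intro hcond
                      have h2 := (Bool.and_eq_true_iff.mp hcond).2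
                      have : r = k + 1 := by exact_mod_cast of_decide_eq_true h2
                      simp only at hq
                      omega
                · have hu' : u.isEmpty = false := Bool.eq_false_iff.mpr hu
                  have hsu : PySem.Set.equal s u = false := by
                    simp only [pvContB, hu', Bool.not_false, Bool.true_and] at hct'
                    exact hct'
                  have hrw : pvInfoS (k + 1) (u :: t') = (k + 1, u) :: pvInfoS (k + 1 + 1) t' := by
                    simp [pvInfoS, hu']
                  rw [hrw]
                  simp only [pvExtendA]
                  rw [if_neg]
                  intro hcond
                  have h1 := (Bool.and_eq_true_iff.mp hcond).1
                  have := pvEq_symm h1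
                  rw [hsu] at this
                  exact absurd this (by simp)
          constructor
          · intro hc
            have hps : PySem.Set.equal p s = false := by
              simp only [pvContB, hsne, Bool.not_false, Bool.true_and] at hc
              exact hc
            have hst : pvStL p k (s :: t) = k :: pvStL s (k + 1) t := by
              simp [pvStL, hsne, hps]
            rw [hst, hsnx, hinfo, List.zip_cons_cons]
            simp only [pvGroupsA, hstop]
            rw [(ih (k + 1) s).1 hct']
          · intro hc
            have hps : PySem.Set.equal p s = true := by
              simp only [pvContB, hsne, Bool.not_false, Bool.true_and] at hc
              exact hc
            have hst : pvStL p k (s :: t) = pvStL s (k + 1) t := by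
              simp [pvStL, hps]
            have hstep : pvExtendA (k - 1) p (pvInfoS k (s :: t))
                = (k, pvInfoS (k + 1) t) := by
              rw [hinfo]
              simp only [pvExtendA]
              have hcnd : (PySem.Set.equal s p && (k == k - 1 + 1)) = true := by
                rw [Bool.and_eq_true]
                refine ⟨pvEq_symm hps, ?_⟩
                simp only [beq_iff_eq]
                omega
              rw [if_pos hcnd]
              rw [pvExtendA_congr hps _ k, hstop]
            refine ⟨pvEnL (k + 1) t, ?_, ?_⟩
            · rw [hsnx, hstep]
            · rw [hst, hstep]
              exact (ih (k + 1) s).1 hct'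

theorem pvBounds_eq (sig : List (PySem.Set Int)) : pvBounds sig = pvGroupsA (pvInfoS 0 sig) := by
  have hcont : pvContB PySem.Set.empty sig = false := by
    cases sig with
    | nil => rfl
    | cons s t =>
        simp only [pvContB]
        by_cases hs : s.isEmpty = true
        · simp [hs]
        · have h1 : PySem.Set.equal PySem.Set.empty s = false :=
            pvEq_empty PySem.Set.empty s rfl (Bool.eq_false_iff.mpr hs)
          rw [h1, Bool.and_false]
  show _ = _
  rw [pvBounds, PySem.List.slice_from_one, pvStarts_eq sig PySem.Set.empty 0, pvEnds_eq sig 0]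
  exact (pvZE sig 0 PySem.Set.empty).1 hcont

-- ---- bounds delivered by the grouping ----
theorem pvExtendA_spec (S : PySem.Set Int) :
    ∀ (info : List (Int × PySem.Set Int)) (e : Int),
      e ≤ (pvExtendA e S info).1
        ∧ ((pvExtendA e S info).1 = e ∨ (pvExtendA e S info).1 ∈ info.map (·.1))
        ∧ ∀ q ∈ (pvExtendA e S info).2, q ∈ info := by
  intro info
  induction info with
  | nil => intro e; simp [pvExtendA]
  | cons p rest ih =>
      intro e
      by_cases hcond : (PySem.Set.equal p.2 S && (p.1 == e + 1)) = true
      · have hstep : pvExtendA e S (p :: rest) = pvExtendA p.1 S rest := by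
          obtain ⟨a, b⟩ := p
          simp only [pvExtendA]
          rw [if_pos hcond]
        have he : p.1 = e + 1 := by
          have := (Bool.and_eq_true_iff.mp hcond).2
          exact_mod_cast of_decide_eq_true this
        obtain ⟨h1, h2, h3⟩ := ih p.1
        refine ⟨?_, ?_, ?_⟩
        · rw [hstep]; omega
        · rw [hstep]
          rcases h2 with h2 | h2
          · right; rw [h2]; simp
          · right; simp [List.mem_cons]; right
            simpa using h2
        · intro q hq
          rw [hstep] at hq
          exact List.mem_cons_of_mem _ (h3 q hq)
      · have hstep : pvExtendA e S (p :: rest) = (e, p :: rest) := by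
          obtain ⟨a, b⟩ := p
          simp only [pvExtendA]
          rw [if_neg hcond]
        rw [hstep]
        simp

theorem pvGroupsA_bounds (n : Int) :
    ∀ (info : List (Int × PySem.Set Int)),
      (∀ p ∈ info, 0 ≤ p.1 ∧ p.1 < n) →
      ∀ g ∈ pvGroupsA info, 0 ≤ g.1 ∧ g.1 ≤ g.2 ∧ g.2 < n := by
  intro info
  induction info using pvGroupsA.induct with
  | case1 => intro _ g hg; simp [pvGroupsA] at hg
  | case2 r s rest p ih =>
      intro hb g hg
      rw [pvGroupsA] at hg
      obtain ⟨he, hmem, hsub⟩ := pvExtendA_spec s rest r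
      rcases List.mem_cons.mp hg with hg | hg
      · subst hg
        refine ⟨(hb _ List.mem_cons_self).1, he, ?_⟩
        rcases hmem with hm | hm
        · rw [hm]; exact (hb _ List.mem_cons_self).2
        · obtain ⟨q, hq, hq2⟩ := List.mem_map.mp hm
          rw [← hq2]
          exact (hb _ (List.mem_cons_of_mem _ hq)).2
      · exact ih (fun q hq =>
          hb _ (List.mem_cons_of_mem _ (hsub q hq))) g hg

-- ---- A's info computations target the same signature lists ----
theorem pvRowInfoA_eq (grid : List (List Int))
    (hpre : ∀ row ∈ grid, (PySem.List.pyGetD grid 0 []).length ≤ row.length) :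
    pvRowInfoA grid (grid.length : Int) ((PySem.List.pyGetD grid 0 []).length : Int)
      = pvInfoS 0 (grid.map (fun row =>
          pvSig (PySem.List.slice row none (some ((PySem.List.pyGetD grid 0 []).length : Int))))) := by
  set W : Nat := (PySem.List.pyGetD grid 0 []).length with hW
  set rsig : List (PySem.Set Int) :=
    grid.map (fun row => pvSig (PySem.List.slice row none (some (W : Int)))) with hrsig
  have hrlen : rsig.length = grid.length := by simp [hrsig]
  have hB : pvInfoS 0 rsig
      = ((PySem.List.pyRange 0 (grid.length : Int) 1).filter
          (fun j => !(PySem.List.pyGetD rsig j PySem.Set.empty).isEmpty)).map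
          (fun j => (j, PySem.List.pyGetD rsig j PySem.Set.empty)) := by
    rw [pvInfoS_filter, PySem.List.enumerate_eq_map_pyRange rsig PySem.Set.empty]
    have hlen2 : PySem.List.len rsig = (grid.length : Int) := by
      simp [PySem.List.len, hrlen]
    rw [hlen2, List.filter_map]
    rfl
  rw [hB, pvRowInfoA, pv_foldl_append_ifnot, List.nil_append]
  have hpt : ∀ r ∈ PySem.List.pyRange 0 (grid.length : Int) 1,
      PySem.Set.ofList (((PySem.List.pyRange 0 (W : Int) 1).map (fun c =>
          PySem.List.pyGetD (PySem.List.pyGetD grid r []) c 0)).filter (fun v => !(v == 0)))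
        = PySem.List.pyGetD rsig r PySem.Set.empty := by
    intro r hr
    rw [PySem.List.mem_pyRange_one] at hr
    have hlt : r.toNat < grid.length := by omega
    have hgrid : PySem.List.pyGetD grid r [] = grid[r.toNat] :=
      PySem.List.pyGetD_eq_getElem grid [] hr.1 (by exact_mod_cast hr.2)
    have hrow : PySem.List.pyGetD rsig r PySem.Set.empty = pvSig ((grid[r.toNat]).take W) := by
      rw [PySem.List.pyGetD_eq_getElem rsig PySem.Set.empty hr.1 (by rw [hrlen]; exact_mod_cast hr.2)]
      simp [hrsig, PySem.List.slice_to_natCast]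
    have hWle : W ≤ (grid[r.toNat]).length := hpre _ (List.getElem_mem hlt)
    have hmr : (PySem.List.pyRange 0 (W : Int) 1).map (fun c =>
        PySem.List.pyGetD (grid[r.toNat]) c 0) = (grid[r.toNat]).take W := by
      simpa using pv_mapRange_getD (grid[r.toNat]) 0 0 W hWle
    rw [hgrid, hrow, hmr, pvSig]
  rw [List.filter_congr (fun r hr => by rw [hpt r hr]),
      List.map_congr_left (fun r hr => by rw [hpt r (List.mem_of_mem_filter hr)])]

theorem pvColInfoA_eq (grid : List (List Int)) :
    pvColInfoA grid (grid.length : Int) ((PySem.List.pyGetD grid 0 []).length : Int)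
      = pvInfoS 0 ((PySem.List.pyRange 0 (((PySem.List.pyGetD grid 0 []).length : Nat) : Int) 1).map
          (fun c => pvSig ((PySem.List.pyRange 0 (grid.length : Int) 1).map (fun r =>
            PySem.List.pyGetD (PySem.List.pyGetD grid r []) c 0)))) := by
  set W : Nat := (PySem.List.pyGetD grid 0 []).length with hW
  set f : Int → PySem.Set Int := fun c =>
    pvSig ((PySem.List.pyRange 0 (grid.length : Int) 1).map (fun r =>
      PySem.List.pyGetD (PySem.List.pyGetD grid r []) c 0)) with hf
  set csig : List (PySem.Set Int) := (PySem.List.pyRange 0 (W : Int) 1).map f with hcsig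
  have hclen : csig.length = W := by
    simp [hcsig, PySem.List.length_pyRange_one]
  have hB : pvInfoS 0 csig
      = ((PySem.List.pyRange 0 (W : Int) 1).filter
          (fun j => !(PySem.List.pyGetD csig j PySem.Set.empty).isEmpty)).map
          (fun j => (j, PySem.List.pyGetD csig j PySem.Set.empty)) := by
    rw [pvInfoS_filter, PySem.List.enumerate_eq_map_pyRange csig PySem.Set.empty]
    have hlen2 : PySem.List.len csig = (W : Int) := by
      simp [PySem.List.len, hclen]
    rw [hlen2, List.filter_map]
    rfl
  rw [hB, pvColInfoA, pv_foldl_append_ifnot, List.nil_append]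
  have hpt : ∀ c ∈ PySem.List.pyRange 0 (W : Int) 1,
      PySem.Set.ofList (((PySem.List.pyRange 0 (grid.length : Int) 1).map (fun r =>
          PySem.List.pyGetD (PySem.List.pyGetD grid r []) c 0)).filter (fun v => !(v == 0)))
        = PySem.List.pyGetD csig c PySem.Set.empty := by
    intro c hc
    rw [PySem.List.mem_pyRange_one] at hc
    rw [hcsig, PySem.List.pyGetD_map_pyRange_of_nonneg f (W : Int) c PySem.Set.empty hc.1 hc.2]
    rw [hf]
    rfl
  rw [List.filter_congr (fun c hc => by rw [hpt c hc]),
      List.map_congr_left (fun c hc => by rw [hpt c (List.mem_of_mem_filter hc)])]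

-- ---- the run scan over the sorted block values ----
def pvModeF (st : Int × Int × Int × Option Int) (v : Int) : Int × Int × Int × Option Int :=
  let run := if st.2.2.2 == some v then st.2.2.1 + 1 else 1
  if run > st.1 then (run, v, run, some v) else (st.1, st.2.1, run, some v)

theorem pvMode_eq_foldF (vals : List Int) :
    pvMode vals = ((PySem.List.sorted vals (fun v => v) false).foldl pvModeF (0, 0, 0, none)).2.1 :=
  rfl

-- loop invariant of the run scan: after a sorted prefix P, prev is the last (largest) value,
-- run its count in P, best the maximal count, colour the smallest value attaining it
def pvInv (P : List Int) (st : Int × Int × Int × Option Int) : Prop :=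
  ∃ q, st.2.2.2 = some q ∧ q ∈ P ∧ (∀ x ∈ P, x ≤ q) ∧ st.2.2.1 = (P.count q : Int) ∧
    st.2.1 ∈ P ∧ ((P.count st.2.1 : Int) = st.1) ∧ (∀ x ∈ P, (P.count x : Int) ≤ st.1) ∧
    (∀ x ∈ P, (P.count x : Int) = st.1 → st.2.1 ≤ x)

theorem pv_count_app_self (P : List Int) (v : Int) : (P ++ [v]).count v = P.count v + 1 := by
  simp [List.count_append]

theorem pv_count_app_ne (P : List Int) (v x : Int) (hx : x ≠ v) :
    (P ++ [v]).count x = P.count x := by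
  have : v ≠ x := Ne.symm hx
  simp [List.count_append, List.count_singleton, this]

theorem pvModeStep (P : List Int) (st : Int × Int × Int × Option Int) (v : Int)
    (hinv : pvInv P st) (hge : ∀ x ∈ P, x ≤ v) : pvInv (P ++ [v]) (pvModeF st v) := by
  obtain ⟨q, hprev, hqP, hqmax, hrun, hcP, hcb, hmax, hmin⟩ := hinv
  obtain ⟨best, colour, run, prev⟩ := st
  simp only at hprev hqmax hrun hcP hcb hmax hmin
  subst hprev
  subst hrun
  have hvmem : v ∈ P ++ [v] := by simp
  by_cases hqv : q = v
  · subst hqv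
    have hstep : pvModeF (best, colour, (P.count q : Int), some q) q
        = if (P.count q : Int) + 1 > best
          then ((P.count q : Int) + 1, q, (P.count q : Int) + 1, some q)
          else (best, colour, (P.count q : Int) + 1, some q) := by
      simp [pvModeF]
    rw [hstep]
    have hcnt : ((P ++ [q]).count q : Int) = (P.count q : Int) + 1 := by
      rw [pv_count_app_self]; push_cast; ring
    by_cases hgt : (P.count q : Int) + 1 > best
    · rw [if_pos hgt]
      refine ⟨q, rfl, hvmem, ?_, by simp [hcnt], hvmem, by simp [hcnt], ?_, ?_⟩
      · intro x hx
        rcases List.mem_append.mp hx with hx | hx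
        · exact hge x hx
        · simp at hx; omega
      · intro x hx
        by_cases hxq : x = q
        · subst hxq; simp [hcnt]
        · rw [pv_count_app_ne P q x hxq]
          have : (P.count x : Int) ≤ best := by
            rcases List.mem_append.mp hx with hx | hx
            · exact hmax x hx
            · simp at hx; exact absurd hx hxq
          simp only
          omega
      · intro x hx hcx
        by_cases hxq : x = q
        · subst hxq; exact le_refl _
        · rw [pv_count_app_ne P q x hxq] at hcx
          have hxP : x ∈ P := by
            rcases List.mem_append.mp hx with hx | hx
            · exact hx
            · simp at hx; exact absurd hx hxq
          have := hmax x hxP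
          simp only at hcx
          omega
    · rw [if_neg hgt]
      have hcne : colour ≠ q := by
        intro h
        subst h
        omega
      refine ⟨q, rfl, hvmem, ?_, by simp [hcnt], List.mem_append_left _ hcP,
        by simp [pv_count_app_ne P q colour hcne, hcb], ?_, ?_⟩
      · intro x hx
        rcases List.mem_append.mp hx with hx | hx
        · exact hge x hx
        · simp at hx; omega
      · intro x hx
        by_cases hxq : x = q
        · subst hxq; simp only [hcnt]; omega
        · rw [pv_count_app_ne P q x hxq]
          rcases List.mem_append.mp hx with hx | hx
          · exact hmax x hx
          · simp at hx; exact absurd hx hxq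
      · intro x hx hcx
        by_cases hxq : x = q
        · subst hxq
          exact le_trans (hge colour hcP) (le_refl _)
        · rw [pv_count_app_ne P q x hxq] at hcx
          have hxP : x ∈ P := by
            rcases List.mem_append.mp hx with hx | hx
            · exact hx
            · simp at hx; exact absurd hx hxq
          exact hmin x hxP hcx
  · -- new, strictly larger value
    have hqlt : q < v := lt_of_le_of_ne (hge q hqP) hqv
    have hvP : v ∉ P := by
      intro hv
      exact hqv (le_antisymm (hge q hqP) (hqmax v hv))
    have hstep : pvModeF (best, colour, (P.count q : Int), some q) v
        = if (1 : Int) > best then (1, v, 1, some v) else (best, colour, 1, some v) := by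
      simp [pvModeF, hqv]
    have hbest1 : (1 : Int) ≤ best := by
      have h1 : 1 ≤ P.count colour := List.count_pos_iff.mpr hcP
      omega
    rw [hstep, if_neg (by omega)]
    have hcntv : ((P ++ [v]).count v : Int) = 1 := by
      rw [pv_count_app_self, List.count_eq_zero.mpr hvP]
      simp
    have hcne : colour ≠ v := fun h => hvP (h ▸ hcP)
    refine ⟨v, rfl, hvmem, ?_, hcntv.symm, List.mem_append_left _ hcP,
      by simp [pv_count_app_ne P v colour hcne, hcb], ?_, ?_⟩
    · intro x hx
      rcases List.mem_append.mp hx with hx | hx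
      · exact hge x hx
      · simp at hx; omega
    · intro x hx
      by_cases hxv : x = v
      · subst hxv; simp only [hcntv]; omega
      · rw [pv_count_app_ne P v x hxv]
        rcases List.mem_append.mp hx with hx | hx
        · exact hmax x hx
        · simp at hx; exact absurd hx hxv
    · intro x hx hcx
      by_cases hxv : x = v
      · subst hxv
        exact le_trans (le_trans (hmin colour hcP hcb) (hqmax colour hcP)) (le_of_lt hqlt)
      · rw [pv_count_app_ne P v x hxv] at hcx
        have hxP : x ∈ P := by
          rcases List.mem_append.mp hx with hx | hx
          · exact hx
          · simp at hx; exact absurd hx hxv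
        exact hmin x hxP hcx

theorem pvModeGo : ∀ (t P : List Int) (st : Int × Int × Int × Option Int),
    pvInv P st → (∀ y ∈ t, ∀ x ∈ P, x ≤ y) → t.Pairwise (· ≤ ·) →
    pvInv (P ++ t) (t.foldl pvModeF st) := by
  intro t
  induction t with
  | nil => intro P st h _ _; simpa using h
  | cons v t' ih =>
      intro P st hinv hge hpw
      have h1 : pvInv (P ++ [v]) (pvModeF st v) :=
        pvModeStep P st v hinv (fun x hx => hge v List.mem_cons_self x hx)
      have h2 := ih (P ++ [v]) (pvModeF st v) h1
        (fun y hy x hx => by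
          rcases List.mem_append.mp hx with hx | hx
          · exact hge y (List.mem_cons_of_mem _ hy) x hx
          · rcases List.mem_singleton.mp hx with rfl
            exact List.rel_of_pairwise_cons hpw hy)
        hpw.of_cons
      rw [List.foldl_cons]
      simpa [List.append_assoc] using h2

theorem pvMode_isMode (L : List Int) (hL : L ≠ []) :
    pvMode L ∈ L ∧ (∀ y ∈ L, L.count y ≤ L.count (pvMode L)) ∧
      (∀ y ∈ L, L.count y = L.count (pvMode L) → pvMode L ≤ y) := by
  obtain ⟨v, t, hS⟩ : ∃ v t, PySem.List.sorted L (fun v => v) false = v :: t := by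
    cases hS : PySem.List.sorted L (fun v => v) false with
    | nil => exact absurd ((PySem.List.sorted_eq_nil_iff _ _ _).mp hS) hL
    | cons v t => exact ⟨v, t, rfl⟩
  have hperm : (v :: t).Perm L := hS ▸ PySem.List.sorted_perm L (fun v => v) false
  have hpw : (v :: t).Pairwise (· ≤ ·) := by
    have h := PySem.List.sorted_pairwise (xs := L) (key := fun v => v)
    rw [hS] at h
    exact h
  have hinit : pvInv [v] (pvModeF (0, 0, 0, none) v) := by
    have h : pvModeF (0, 0, 0, none) v = (1, v, 1, some v) := by simp [pvModeF]
    rw [h]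
    exact ⟨v, rfl, by simp, by simp, by simp, by simp, by simp, by simp, by simp⟩
  have hgo := pvModeGo t [v] (pvModeF (0, 0, 0, none) v) hinit
    (fun y hy x hx => by
      rcases List.mem_singleton.mp hx with rfl
      exact List.rel_of_pairwise_cons hpw hy)
    hpw.of_cons
  rw [List.singleton_append] at hgo
  have hfold : pvMode L = ((v :: t).foldl pvModeF (0, 0, 0, none)).2.1 := by
    rw [pvMode_eq_foldF, hS]
  rw [List.foldl_cons] at hfold
  obtain ⟨q, _, _, _, _, hcP, hcb, hmax, hmin⟩ := hgo
  rw [← hfold] at hcP hcb hmin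
  refine ⟨hperm.mem_iff.mp hcP, ?_, ?_⟩
  · intro y hy
    have hyS : y ∈ v :: t := hperm.mem_iff.mpr hy
    have h1 := hmax y hyS
    rw [hperm.count_eq] at h1
    rw [hperm.count_eq] at hcb
    omega
  · intro y hy hcy
    have hyS : y ∈ v :: t := hperm.mem_iff.mpr hy
    apply hmin y hyS
    rw [hperm.count_eq] at hcb ⊢
    rw [hcy]
    exact hcb

-- A's dict argmax / min-over-argmax equals the run scan
theorem pvColourA_eq_mode (L : List Int) :
    (if (PySem.Dict.counter L).items.isEmpty then (0 : Int)
     else (PySem.List.min? (((PySem.Dict.counter L).items.filter (fun kv =>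
             kv.2 == (PySem.List.max? (PySem.Dict.counter L).values (fun y => y)).getD 0)).map (·.1))
           (fun k => k)).getD 0)
      = pvMode L := by
  by_cases hL : L = []
  · subst hL; rfl
  · obtain ⟨x, hx⟩ := List.exists_mem_of_ne_nil L hL
    have hD : x ∈ PySem.Set.ofList L := (PySem.Set.mem_ofList L x).mpr hx
    have hDne : PySem.Set.ofList L ≠ [] := List.ne_nil_of_mem hD
    have hitems : (PySem.Dict.counter L).items
        = (PySem.Set.ofList L).map (fun k => (k, (L.count k : Int))) := PySem.Dict.items_counter L
    have hitne : ¬ (PySem.Dict.counter L).items.isEmpty := by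
      rw [hitems]
      simp [List.isEmpty_iff, hDne]
    rw [if_neg hitne]
    have hvals : (PySem.Dict.counter L).values
        = (PySem.Set.ofList L).map (fun k => (L.count k : Int)) := by
      show (PySem.Dict.counter L).items.map (·.2) = _
      rw [hitems, List.map_map]
      rfl
    set D := PySem.Set.ofList L with hDdef
    obtain ⟨M, hM⟩ : ∃ M, PySem.List.max? (PySem.Dict.counter L).values (fun y => y) = some M := by
      cases hmv : PySem.List.max? (PySem.Dict.counter L).values (fun y => y) with
      | none =>
          rw [PySem.List.max?_eq_none_iff, hvals, List.map_eq_nil_iff] at hmv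
          exact absurd hmv hDne
      | some M => exact ⟨M, rfl⟩
    have hMmax : ∀ k ∈ D, (L.count k : Int) ≤ M := fun k hk =>
      PySem.List.max?_isMax hM _ (by rw [hvals]; exact List.mem_map.mpr ⟨k, hk, rfl⟩)
    have hfilt : ((PySem.Dict.counter L).items.filter (fun kv =>
          kv.2 == (PySem.List.max? (PySem.Dict.counter L).values (fun y => y)).getD 0)).map (·.1)
        = D.filter (fun k => ((L.count k : Int) == M)) := by
      rw [hM, Option.getD_some, hitems, List.filter_map, List.map_map]
      simp [Function.comp_def]
    rw [hfilt]
    obtain ⟨hbmem, hbmax, hbmin⟩ := pvMode_isMode L hL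
    have hMval : M ∈ (PySem.Dict.counter L).values := PySem.List.max?_mem hM
    obtain ⟨k0, hk0D, hk0⟩ : ∃ k0 ∈ D, M = (L.count k0 : Int) := by
      rw [hvals] at hMval
      obtain ⟨k0, hk0, he⟩ := List.mem_map.mp hMval
      exact ⟨k0, hk0, he.symm⟩
    have hk0L : k0 ∈ L := (PySem.Set.mem_ofList L k0).mp hk0D
    have hMb : M = (L.count (pvMode L) : Int) := by
      have h1 : (L.count (pvMode L) : Int) ≤ M := hMmax _ ((PySem.Set.mem_ofList L _).mpr hbmem)
      have h2 : L.count k0 ≤ L.count (pvMode L) := hbmax k0 hk0L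
      omega
    have hbfilt : pvMode L ∈ D.filter (fun k => ((L.count k : Int) == M)) :=
      List.mem_filter.mpr ⟨(PySem.Set.mem_ofList L _).mpr hbmem, by simp [hMb]⟩
    obtain ⟨m, hm⟩ : ∃ m, PySem.List.min? (D.filter (fun k => ((L.count k : Int) == M)))
        (fun k => k) = some m := by
      cases hmv : PySem.List.min? (D.filter (fun k => ((L.count k : Int) == M))) (fun k => k) with
      | none =>
          rw [PySem.List.min?_eq_none_iff] at hmv
          rw [hmv] at hbfilt
          exact absurd hbfilt (List.not_mem_nil)
      | some m => exact ⟨m, rfl⟩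
    rw [hm, Option.getD_some]
    have hmmem := PySem.List.min?_mem hm
    have hmD := (List.mem_filter.mp hmmem).1
    have hmcnt : (L.count m : Int) = M := by
      have h := (List.mem_filter.mp hmmem).2
      simpa using h
    have hmb : m ≤ pvMode L := PySem.List.min?_isMin hm _ hbfilt
    have hbm : pvMode L ≤ m := by
      apply hbmin m ((PySem.Set.mem_ofList L m).mp hmD)
      have : (L.count m : Int) = (L.count (pvMode L) : Int) := by rw [hmcnt, hMb]
      exact_mod_cast this
    omega

-- A's nested frequency loop is the counter of the flattened nonzero block list
theorem pvFreq_counter (grid : List (List Int)) (r0 r1 c0 c1 : Int) :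
    (PySem.List.pyRange r0 (r1 + 1) 1).foldl (fun d r =>
      (PySem.List.pyRange c0 (c1 + 1) 1).foldl (fun d c =>
        let v := PySem.List.pyGetD (PySem.List.pyGetD grid r []) c 0
        if !(v == 0) then d.insert v (d.getD v 0 + 1) else d) d) PySem.Dict.empty
      = PySem.Dict.counter ((PySem.List.pyRange r0 (r1 + 1) 1).flatMap (fun r =>
          ((PySem.List.pyRange c0 (c1 + 1) 1).map (fun c =>
            PySem.List.pyGetD (PySem.List.pyGetD grid r []) c 0)).filter (fun v => !(v == 0)))) := by
  rw [← PySem.Dict.foldl_insert_getD_add_one_eq_counter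
        ((PySem.List.pyRange r0 (r1 + 1) 1).flatMap (fun r =>
          ((PySem.List.pyRange c0 (c1 + 1) 1).map (fun c =>
            PySem.List.pyGetD (PySem.List.pyGetD grid r []) c 0)).filter (fun v => !(v == 0))))]
  rw [pv_foldl_flatMap]
  apply PySem.List.foldl_congr_mem
  intro d r _
  rw [List.foldl_filter, List.foldl_map]

-- per-block equality: A's colour = B's run-scan mode of the sliced block
theorem pvBlock_eq (grid : List (List Int))
    (hpre : ∀ row ∈ grid, (PySem.List.pyGetD grid 0 []).length ≤ row.length)
    (r0 r1 c0 c1 : Int)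
    (hr0 : 0 ≤ r0) (hr1 : r1 < (grid.length : Int))
    (hc0 : 0 ≤ c0) (hc01 : c0 ≤ c1) (hc1 : c1 < ((PySem.List.pyGetD grid 0 []).length : Int)) :
    pvBlockColourA grid r0 r1 c0 c1
      = pvMode (((PySem.List.pyRange r0 (r1 + 1) 1).flatMap (fun r =>
          PySem.List.slice (PySem.List.pyGetD grid r []) (some c0) (some (c1 + 1)))).filter
            (fun v => !(v == 0))) := by
  set W : Nat := (PySem.List.pyGetD grid 0 []).length with hW
  set L : List Int := (PySem.List.pyRange r0 (r1 + 1) 1).flatMap (fun r =>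
      ((PySem.List.pyRange c0 (c1 + 1) 1).map (fun c =>
        PySem.List.pyGetD (PySem.List.pyGetD grid r []) c 0)).filter (fun v => !(v == 0))) with hLdef
  have hblock : ((PySem.List.pyRange r0 (r1 + 1) 1).flatMap (fun r =>
      PySem.List.slice (PySem.List.pyGetD grid r []) (some c0) (some (c1 + 1)))).filter
        (fun v => !(v == 0)) = L := by
    rw [pv_filter_flatMap, hLdef]
    apply List.flatMap_congr
    intro r hr
    rw [PySem.List.mem_pyRange_one] at hr
    have hrH : r < (grid.length : Int) := by omega
    have hrlt : r.toNat < grid.length := by omega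
    have hgrid : PySem.List.pyGetD grid r [] = grid[r.toNat] :=
      PySem.List.pyGetD_eq_getElem grid [] (by omega) (by exact_mod_cast hrH)
    have hWle : W ≤ (grid[r.toNat]).length := hpre _ (List.getElem_mem hrlt)
    rw [hgrid, PySem.List.slice_toNat _ hc0 (by omega)]
    have hinner : (PySem.List.pyRange c0 (c1 + 1) 1).map (fun c =>
        PySem.List.pyGetD (grid[r.toNat]) c 0)
        = ((grid[r.toNat]).drop c0.toNat).take ((c1 + 1).toNat - c0.toNat) := by
      have h := pv_mapRange_getD (grid[r.toNat]) 0 c0.toNat (c1 + 1).toNat (by omega)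
      rw [Int.toNat_of_nonneg hc0, Int.toNat_of_nonneg (by omega : (0 : Int) ≤ c1 + 1)] at h
      exact h
    rw [hinner]
  rw [pvBlockColourA]
  simp only [pvFreq_counter grid r0 r1 c0 c1, ← hLdef, hblock]
  exact pvColourA_eq_mode L

theorem transform_eq_alt (grid : List (List Int)) (h : Pre_transform grid) :
    transform grid = transform_alt grid := by
  obtain ⟨hne, hpre0⟩ := h
  have hhead : PySem.List.pyGetD grid 0 [] = grid.headI := by
    cases grid with
    | nil => exact absurd rfl hne
    | cons a t => simp [pysem]
  have hpre : ∀ row ∈ grid, (PySem.List.pyGetD grid 0 []).length ≤ row.length := by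
    intro row hrow
    rw [hhead]
    exact hpre0 row hrow
  set W : Nat := (PySem.List.pyGetD grid 0 []).length with hW
  set rsig : List (PySem.Set Int) :=
    grid.map (fun row => pvSig (PySem.List.slice row none (some (W : Int)))) with hrsig
  set csig : List (PySem.Set Int) := (PySem.List.pyRange 0 (W : Int) 1).map (fun c =>
    pvSig ((PySem.List.pyRange 0 (grid.length : Int) 1).map (fun r =>
      PySem.List.pyGetD (PySem.List.pyGetD grid r []) c 0))) with hcsig
  have hrlen : rsig.length = grid.length := by simp [hrsig]
  have hclen : csig.length = W := by simp [hcsig, PySem.List.length_pyRange_one]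
  have hrg : pvGroupsA (pvRowInfoA grid (grid.length : Int) (W : Int)) = pvBounds rsig := by
    rw [pvRowInfoA_eq grid hpre, pvBounds_eq]
  have hcg : pvGroupsA (pvColInfoA grid (grid.length : Int) (W : Int)) = pvBounds csig := by
    rw [pvColInfoA_eq grid, pvBounds_eq]
  have hrowsb : ∀ g ∈ pvBounds rsig, 0 ≤ g.1 ∧ g.1 ≤ g.2 ∧ g.2 < (grid.length : Int) := by
    rw [pvBounds_eq]
    apply pvGroupsA_bounds
    intro q hq
    have h := pvInfoS_bounds rsig 0 q hq
    rw [hrlen] at h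
    omega
  have hcolsb : ∀ g ∈ pvBounds csig, 0 ≤ g.1 ∧ g.1 ≤ g.2 ∧ g.2 < (W : Int) := by
    rw [pvBounds_eq]
    apply pvGroupsA_bounds
    intro q hq
    have h := pvInfoS_bounds csig 0 q hq
    rw [hclen] at h
    omega
  show
    (pvGroupsA (pvRowInfoA grid (grid.length : Int) (W : Int))).foldl (fun res g =>
      res ++ [((pvGroupsA (pvColInfoA grid (grid.length : Int) (W : Int))).foldl (fun rv h =>
        rv ++ [pvBlockColourA grid g.1 g.2 h.1 h.2]) []).reverse]) []
    = (pvBounds rsig).map (fun g => ((pvBounds csig).reverse).map (fun h =>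
        pvMode (((PySem.List.pyRange g.1 (g.2 + 1) 1).flatMap (fun r =>
          PySem.List.slice (PySem.List.pyGetD grid r []) (some h.1) (some (h.2 + 1)))).filter
            (fun v => !(v == 0)))))
  rw [hrg, hcg]
  simp only [PySem.List.foldl_append_singleton_eq_map, List.nil_append]
  apply List.map_congr_left
  intro g hg
  rw [List.map_reverse]
  congr 1
  apply List.map_congr_left
  intro p hp
  obtain ⟨hg1, hg2, hg3⟩ := hrowsb g hg
  obtain ⟨hp1, hp2, hp3⟩ := hcolsb p hp
  exact pvBlock_eq grid hpre g.1 g.2 p.1 p.2 hg1 hg3 hp1 hp2 hp3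


-- ===== VERDICT (by name: the statement is the Claim_ definition above) =====
theorem transform_spec : Claim_equal_transform := by
  intro grid _ hpre
  unfold Spec_transform
  exact transform_eq_alt grid hpre
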